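-- pv_equiv track=rewrite | github.com/mortyc126-debug/SHA | alg_attack/verify_constants.py | carry_chain
-- ===== SOURCE A (Python) =====
-- def carry_chain(a, b, n=32):
--     """Compute carry chain for a + b (n-bit)."""
--     c = [0] * n
--     carry = 0
--     for i in range(n):
--         ai = (a >> i) & 1
--         bi = (b >> i) & 1
--         # MAJ(ai, bi, carry)
--         c[i] = (ai & bi) | (ai & carry) | (bi & carry)
--         carry = c[i]
--     return c
-- ===== SOURCE B (Python) =====
-- def carry_chain(a, b, n=32):
--     """Compute carry chain for a + b (n-bit)."""
--     s = a + b
--     return [(s >> (i + 1)) - (a >> (i + 1)) - (b >> (i + 1)) for i in range(n)]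
-- ===== Notes on version B (the rewrite author's own statement) =====
-- stated objective: alternative
-- what changed: B replaces A's sequential MAJ carry recurrence (a running carry threaded through a loop of per-bit AND/OR operations) by a closed form with no loop-carried state: the carry out of bit i equals (s>>(i+1)) - (a>>(i+1)) - (b>>(i+1)) where s = a + b, computed independently per index.
import Mathlib
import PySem

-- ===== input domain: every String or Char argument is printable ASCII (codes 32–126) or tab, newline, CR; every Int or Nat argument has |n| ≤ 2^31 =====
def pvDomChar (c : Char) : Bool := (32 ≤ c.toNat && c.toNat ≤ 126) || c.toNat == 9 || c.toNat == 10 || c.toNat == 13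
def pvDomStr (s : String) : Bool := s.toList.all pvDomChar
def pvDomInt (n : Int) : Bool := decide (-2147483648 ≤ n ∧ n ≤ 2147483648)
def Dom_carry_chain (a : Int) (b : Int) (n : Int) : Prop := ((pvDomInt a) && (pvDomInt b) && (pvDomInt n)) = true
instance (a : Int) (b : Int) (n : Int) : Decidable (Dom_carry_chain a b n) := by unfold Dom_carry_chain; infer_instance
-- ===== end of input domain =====

-- B replaces A's bit-by-bit carry recurrence by a direct closed form: the carry out of
-- bit i is the (i+1)-th bit of the sum of the low i+1 bits of a and b (objective: alternative).


-- ===== PORT A =====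
-- loop body of A: ai = (a>>i)&1; bi = (b>>i)&1; c[i] = (ai&bi)|(ai&carry)|(bi&carry); carry = c[i]
-- (c is pre-filled with zeros and assigned once per index in order, so the port appends c[i])
def carryStep (a : Int) (b : Int) (st : List Int × Int) (i : Int) : List Int × Int :=
  let ai := PySem.Int.band (a >>> i.toNat) 1
  let bi := PySem.Int.band (b >>> i.toNat) 1
  let ci := PySem.Int.bor (PySem.Int.bor (PySem.Int.band ai bi) (PySem.Int.band ai st.2))
              (PySem.Int.band bi st.2)
  (st.1 ++ [ci], ci)

def carry_chain (a : Int) (b : Int) (n : Int) : List Int :=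
  ((PySem.List.pyRange 0 n 1).foldl (carryStep a b) ([], 0)).1

-- ===== PORT B =====
-- B: s = a + b; [(s >> (i+1)) - (a >> (i+1)) - (b >> (i+1)) for i in range(n)]
def carry_chain_alt (a : Int) (b : Int) (n : Int) : List Int :=
  (PySem.List.pyRange 0 n 1).map (fun i =>
    ((a + b) >>> (i.toNat + 1 : Nat)) - (a >>> (i.toNat + 1 : Nat)) - (b >>> (i.toNat + 1 : Nat)))

-- ===== PRECONDITION & SPEC =====
def Spec_carry_chain (a : Int) (b : Int) (n : Int) (out : List Int) : Prop := out = carry_chain_alt a b n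
instance (a : Int) (b : Int) (n : Int) (out : List Int) : Decidable (Spec_carry_chain a b n out) := by unfold Spec_carry_chain; infer_instance

-- ===== CLAIM (what is proved, stated in full; the proofs are below) =====
def Claim_equal_carry_chain : Prop := ∀ (a : Int) (b : Int) (n : Int), Dom_carry_chain a b n → Spec_carry_chain a b n (carry_chain a b n)

-- ===== LEMMAS AND PROOFS =====

-- the carry out of adding the low k bits of a and b
def pvS (a b : Int) (k : Nat) : Int := (a % 2 ^ k + b % 2 ^ k) / 2 ^ k

lemma pvS_zero (a b : Int) : pvS a b 0 = 0 := by simp [pvS]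

-- splitting an emod at a power step: a % (P*2) = a % P + P * ((a/P) % 2)
lemma emod_double (a P : Int) (hP : 0 < P) :
    a % (P * 2) = a % P + P * ((a / P) % 2) := by
  have h1 := Int.mul_ediv_add_emod a P
  have h2 := Int.mul_ediv_add_emod (a / P) 2
  have hr0 : 0 ≤ a % P := Int.emod_nonneg a (by omega)
  have hr1 : a % P < P := Int.emod_lt_of_pos a hP
  rcases Int.emod_two_eq (a / P) with h | h <;> rw [h] <;> rw [h] at h2
  · have key : a = a % P + (P * 2) * (a / P / 2) := by linear_combination -h1 - P * h2
    calc a % (P * 2) = (a % P + (P * 2) * (a / P / 2)) % (P * 2) := by rw [← key]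
    _ = a % P % (P * 2) := by rw [Int.add_mul_emod_self_left]
    _ = a % P := Int.emod_eq_of_lt hr0 (by omega)
    _ = a % P + P * 0 := by ring
  · have key : a = (a % P + P) + (P * 2) * (a / P / 2) := by linear_combination -h1 - P * h2
    calc a % (P * 2) = ((a % P + P) + (P * 2) * (a / P / 2)) % (P * 2) := by rw [← key]
    _ = (a % P + P) % (P * 2) := by rw [Int.add_mul_emod_self_left]
    _ = a % P + P := Int.emod_eq_of_lt (by omega) (by omega)
    _ = a % P + P * 1 := by ring

lemma div_big (P t : Int) (hP : 0 < P) (ht0 : 0 ≤ t) (ht1 : t < P * 2) :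
    (P * 2 + t) / (P * 2) = 1 := by
  have h := Int.add_mul_ediv_left t 1 (show (P * 2) ≠ 0 by omega)
  rw [show P * 2 + t = t + P * 2 * 1 by ring, h, Int.ediv_eq_zero_of_lt ht0 ht1]
  norm_num

lemma band_one_shift (a : Int) (k : Nat) :
    PySem.Int.band (a >>> k) 1 = (a / 2 ^ k) % 2 := by
  rw [PySem.Int.band_one, PySem.Int.mod_eq_emod_of_pos (by norm_num), Int.shiftRight_eq_div_pow]
  push_cast
  rfl

-- the MAJ recurrence computes exactly the carry of the masked sum
lemma maj_eq (a b : Int) (k : Nat) :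
    PySem.Int.bor
      (PySem.Int.bor (PySem.Int.band (PySem.Int.band (a >>> k) 1) (PySem.Int.band (b >>> k) 1))
        (PySem.Int.band (PySem.Int.band (a >>> k) 1) (pvS a b k)))
      (PySem.Int.band (PySem.Int.band (b >>> k) 1) (pvS a b k)) = pvS a b (k + 1) := by
  rw [band_one_shift a k, band_one_shift b k]
  simp only [pvS, pow_succ]
  set P := (2 : Int) ^ k with hPdef
  have hP : 0 < P := by rw [hPdef]; positivity
  have hra0 : 0 ≤ a % P := Int.emod_nonneg a (by omega)
  have hra1 : a % P < P := Int.emod_lt_of_pos a hP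
  have hrb0 : 0 ≤ b % P := Int.emod_nonneg b (by omega)
  have hrb1 : b % P < P := Int.emod_lt_of_pos b hP
  have hs0 : 0 ≤ (a % P + b % P) % P := Int.emod_nonneg _ (by omega)
  have hs1 : (a % P + b % P) % P < P := Int.emod_lt_of_pos _ hP
  have hsplit := Int.mul_ediv_add_emod (a % P + b % P) P
  have hc : (a % P + b % P) / P = 0 ∨ (a % P + b % P) / P = 1 := by
    have h0 : 0 ≤ (a % P + b % P) / P := Int.ediv_nonneg (by omega) hP.le
    have h1 : (a % P + b % P) / P < 2 := by rw [Int.ediv_lt_iff_lt_mul hP]; omega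
    omega
  rw [emod_double a P hP, emod_double b P hP]
  rcases Int.emod_two_eq (a / P) with hx | hx <;> rw [hx] <;>
    rcases Int.emod_two_eq (b / P) with hy | hy <;> rw [hy] <;>
      rcases hc with hcv | hcv <;> rw [hcv] <;> rw [hcv] at hsplit
  · have hz : (a % P + P * 0 + (b % P + P * 0)) / (P * 2) = 0 := Int.ediv_eq_zero_of_lt (by omega) (by omega)
    rw [hz]; decide
  · have hz : (a % P + P * 0 + (b % P + P * 0)) / (P * 2) = 0 := Int.ediv_eq_zero_of_lt (by omega) (by omega)
    rw [hz]; decide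
  · have hz : (a % P + P * 0 + (b % P + P * 1)) / (P * 2) = 0 := Int.ediv_eq_zero_of_lt (by omega) (by omega)
    rw [hz]; decide
  · have h1 : (a % P + P * 0 + (b % P + P * 1)) = P * 2 + ((a % P + b % P) % P) := by omega
    rw [h1, div_big P _ hP (by omega) (by omega)]; decide
  · have hz : (a % P + P * 1 + (b % P + P * 0)) / (P * 2) = 0 := Int.ediv_eq_zero_of_lt (by omega) (by omega)
    rw [hz]; decide
  · have h1 : (a % P + P * 1 + (b % P + P * 0)) = P * 2 + ((a % P + b % P) % P) := by omega
    rw [h1, div_big P _ hP (by omega) (by omega)]; decide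
  · have h1 : (a % P + P * 1 + (b % P + P * 1)) = P * 2 + ((a % P + b % P) % P) := by omega
    rw [h1, div_big P _ hP (by omega) (by omega)]; decide
  · have h1 : (a % P + P * 1 + (b % P + P * 1)) = P * 2 + ((a % P + b % P) % P + P) := by omega
    rw [h1, div_big P _ hP (by omega) (by omega)]; decide

lemma carryStep_eq (a b : Int) (l : List Int) (k : Nat) :
    carryStep a b (l, pvS a b k) (k : Int) = (l ++ [pvS a b (k + 1)], pvS a b (k + 1)) := by
  simp only [carryStep, Int.toNat_natCast, maj_eq]

lemma loopA (a b : Int) (m : Nat) :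
    (PySem.List.pyRange 0 (m : Int) 1).foldl (carryStep a b) ([], 0)
      = ((List.range m).map (fun k => pvS a b (k + 1)), pvS a b m) := by
  induction m with
  | zero =>
    rw [Nat.cast_zero, PySem.List.pyRange_one_eq_nil le_rfl]
    simp [pvS_zero]
  | succ m ih =>
    have hcast : ((m + 1 : Nat) : Int) = (m : Int) + 1 := by push_cast; ring
    rw [hcast, PySem.List.pyRange_one_succ_right (Int.natCast_nonneg m), List.foldl_append, ih]
    simp only [List.foldl_cons, List.foldl_nil, carryStep_eq]
    simp [List.range_succ]

-- the carry into position m is recovered arithmetically from the three shifted values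
lemma cin_eq (a b : Int) (m : Nat) :
    (a + b) / 2 ^ m - a / 2 ^ m - b / 2 ^ m = pvS a b m := by
  simp only [pvS]
  set P := (2 : Int) ^ m with hPdef
  have hP : 0 < P := by rw [hPdef]; positivity
  have ha := Int.mul_ediv_add_emod a P
  have hb := Int.mul_ediv_add_emod b P
  have hs := Int.mul_ediv_add_emod (a % P + b % P) P
  have ht0 : 0 ≤ (a % P + b % P) % P := Int.emod_nonneg _ (by omega)
  have ht1 : (a % P + b % P) % P < P := Int.emod_lt_of_pos _ hP
  have key : a + b = (a % P + b % P) % P + P * (a / P + b / P + (a % P + b % P) / P) := by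
    linear_combination -ha - hb - hs
  rw [key, Int.add_mul_ediv_left _ _ (show P ≠ 0 by omega), Int.ediv_eq_zero_of_lt ht0 ht1]
  ring

lemma alt_body (a b : Int) (k : Nat) :
    ((a + b) >>> (k + 1)) - (a >>> (k + 1)) - (b >>> (k + 1)) = pvS a b (k + 1) := by
  simp only [Int.shiftRight_eq_div_pow]
  push_cast
  exact cin_eq a b (k + 1)

lemma alt_eq_map (a b n : Int) :
    carry_chain_alt a b n = (PySem.List.pyRange 0 n 1).map (fun i => pvS a b (i.toNat + 1)) := by
  unfold carry_chain_alt
  refine List.map_congr_left (fun i _ => ?_)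
  exact alt_body a b i.toNat

-- ===== VERDICT (by name: the statement is the Claim_ definition above) =====
theorem carry_chain_spec : Claim_equal_carry_chain := by
  intro a b n _
  unfold Spec_carry_chain carry_chain
  rw [alt_eq_map]
  by_cases hn : n ≤ 0
  · rw [PySem.List.pyRange_one_eq_nil hn]; rfl
  · have hn' : n = ((n.toNat : Nat) : Int) := by omega
    rw [hn', loopA]
    rw [PySem.List.pyRange_one]
    simp [List.map_map, Function.comp_def]
    rw [show (max n 0).toNat = n.toNat by omega]
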